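-- pv_equiv track=rewrite | github.com/cobaltt7/python-exercises | 8 list/236-240.py | two_three_six
-- ===== SOURCE A (Python) =====
-- from typing import Any, Union, Callable
--
-- def two_three_six(data: list[Any]):
--     """Write a Python program to find the items that are parity outliers in a given list."""
--     even = []
--     odd = []
--     for item in data:
--         if item % 2 == 0:
--             even.append(item)
--         else:
--             odd.append(item)
--     return odd if len(even) > len(odd) else even
-- ===== SOURCE B (Python) =====
-- def two_three_six(data):
--     """Count-then-filter: two integer counters, then one filtering pass."""
--     evens = sum(1 for x in data if x % 2 == 0)
--     odds = len(data) - evens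
--     if evens > odds:
--         return [x for x in data if x % 2 != 0]
--     return [x for x in data if x % 2 == 0]
-- ===== Notes on version B (the rewrite author's own statement) =====
-- stated objective: alternative
-- what changed: Replaces the one-pass dual-list partition with count-then-filter: a first pass keeps only an integer count of evens, the tie rule picks the minority class, and a single filtering comprehension builds the returned list.
import Mathlib
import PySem

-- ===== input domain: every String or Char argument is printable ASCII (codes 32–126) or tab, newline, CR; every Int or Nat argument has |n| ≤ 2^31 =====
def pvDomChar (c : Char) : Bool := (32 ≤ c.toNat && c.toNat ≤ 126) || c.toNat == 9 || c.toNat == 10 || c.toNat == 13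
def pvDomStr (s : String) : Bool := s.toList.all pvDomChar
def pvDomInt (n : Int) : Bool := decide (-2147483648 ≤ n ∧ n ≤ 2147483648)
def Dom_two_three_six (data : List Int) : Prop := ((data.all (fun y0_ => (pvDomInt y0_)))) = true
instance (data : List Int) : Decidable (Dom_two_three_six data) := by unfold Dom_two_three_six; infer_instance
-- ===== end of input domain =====

-- B replaces A's one-pass dual-list partition by count-then-filter (two passes, one counter); same cost, different structure.


-- ===== PORT A =====
def two_three_six (data : List Int) : List Int :=
  let p := data.foldl
    (fun (acc : List Int × List Int) item =>
      if item % 2 == 0 then (acc.1 ++ [item], acc.2) else (acc.1, acc.2 ++ [item]))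
    ([], [])
  if p.1.length > p.2.length then p.2 else p.1

-- ===== PORT B =====
def two_three_six_alt (data : List Int) : List Int :=
  let evens := (data.filter (fun x => x % 2 == 0)).length
  let odds := data.length - evens
  if evens > odds then data.filter (fun x => !(x % 2 == 0))
  else data.filter (fun x => x % 2 == 0)

-- ===== PRECONDITION & SPEC =====
def Spec_two_three_six (data : List Int) (out : List Int) : Prop := out = two_three_six_alt data
instance (data : List Int) (out : List Int) : Decidable (Spec_two_three_six data out) := by unfold Spec_two_three_six; infer_instance

-- ===== CLAIM (what is proved, stated in full; the proofs are below) =====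
def Claim_equal_two_three_six : Prop := ∀ (data : List Int), Dom_two_three_six data → Spec_two_three_six data (two_three_six data)

-- ===== LEMMAS AND PROOFS =====
theorem two_three_six_fold (data e o : List Int) :
    data.foldl
      (fun (acc : List Int × List Int) item =>
        if item % 2 == 0 then (acc.1 ++ [item], acc.2) else (acc.1, acc.2 ++ [item]))
      (e, o)
    = (e ++ data.filter (fun x => x % 2 == 0), o ++ data.filter (fun x => !(x % 2 == 0))) := by
  induction data generalizing e o with
  | nil => simp
  | cons a t ih =>
    by_cases h : (a % 2 == 0) = true
    · rw [List.foldl_cons, if_pos h, ih,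
        List.filter_cons_of_pos (p := fun x => x % 2 == 0) h,
        List.filter_cons_of_neg (p := fun x => !(x % 2 == 0)) (by simp [h])]
      simp
    · rw [List.foldl_cons, if_neg h, ih,
        List.filter_cons_of_neg (p := fun x => x % 2 == 0) h,
        List.filter_cons_of_pos (p := fun x => !(x % 2 == 0)) (by simp [h])]
      simp

-- ===== VERDICT (by name: the statement is the Claim_ definition above) =====
theorem two_three_six_spec : Claim_equal_two_three_six := by
  intro data _
  unfold Spec_two_three_six two_three_six two_three_six_alt
  simp only [two_three_six_fold, List.nil_append]
  have hlen : (data.filter (fun x => x % 2 == 0)).length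
      + (data.filter (fun x => !(x % 2 == 0))).length = data.length := by
    have := data.length_eq_length_filter_add (fun x => x % 2 == 0)
    omega
  have hle : (data.filter (fun x => x % 2 == 0)).length ≤ data.length :=
    List.length_filter_le _ _
  by_cases h : (data.filter (fun x => x % 2 == 0)).length
      > (data.filter (fun x => !(x % 2 == 0))).length
  · rw [if_pos h, if_pos (by omega)]
  · rw [if_neg h, if_neg (by omega)]
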